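-- pv_equiv track=rewrite | github.com/VictoryJu/Python | 승점구하기.py | foo
-- ===== SOURCE A (Python) =====
-- def foo(games):
--     score = games
--     rank = 0
--     for i in range(len(score)):
--         if score[i][0] > score[i][2]:
--             rank += 3
--         elif score[i][0] == score[i][2]:
--             rank += 1
--         else:
--             rank += 0
--
--     return rank
-- ===== SOURCE B (Python) =====
-- def foo(games):
--     # Divide-and-conquer: points of an interval = points(left half) + points(right half).
--     def solve(lo, hi):
--         if hi - lo == 0:
--             return 0
--         if hi - lo == 1:
--             g = games[lo]
--             return 3 if g[0] > g[2] else (1 if g[0] == g[2] else 0)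
--         mid = (lo + hi) // 2
--         return solve(lo, mid) + solve(mid, hi)
--     return solve(0, len(games))
-- ===== Notes on version B (the rewrite author's own statement) =====
-- stated objective: alternative
-- what changed: Replaces A's linear index-driven accumulator loop by a divide-and-conquer recursion that splits the game list's index interval in half and sums the two halves' points, with a single-game base case.
import Mathlib
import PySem

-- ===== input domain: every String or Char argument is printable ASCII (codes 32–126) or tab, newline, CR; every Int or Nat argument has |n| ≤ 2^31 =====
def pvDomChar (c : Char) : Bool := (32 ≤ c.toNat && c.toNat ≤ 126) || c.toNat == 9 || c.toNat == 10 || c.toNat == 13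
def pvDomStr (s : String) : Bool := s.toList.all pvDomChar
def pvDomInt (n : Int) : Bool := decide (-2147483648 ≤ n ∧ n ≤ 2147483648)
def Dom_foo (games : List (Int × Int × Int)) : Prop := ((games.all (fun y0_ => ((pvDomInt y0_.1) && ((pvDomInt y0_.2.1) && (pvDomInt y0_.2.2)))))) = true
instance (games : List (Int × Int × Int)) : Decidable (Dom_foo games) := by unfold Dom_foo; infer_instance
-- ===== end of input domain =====

-- B replaces A's linear accumulating loop by a divide-and-conquer recursion over index intervals.

-- ===== PORT A =====
-- for i in range(len(score)): branch on score[i][0] vs score[i][2], accumulate rank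
def foo (games : List (Int × Int × Int)) : Int :=
  (PySem.List.pyRange 0 games.length 1).foldl
    (fun rank i =>
      let g := PySem.List.pyGetD games i (0, 0, 0)   -- every i in range(len) is in range
      if g.1 > g.2.2 then rank + 3
      else if g.1 = g.2.2 then rank + 1
      else rank + 0) 0

-- ===== PORT B =====
-- solve(lo, hi): points of games[lo:hi], by halving the interval
def fooSolve (games : List (Int × Int × Int)) (lo hi : Nat) : Int :=
  if hi - lo = 0 then 0
  else if hi - lo = 1 then
    let g := games.getD lo (0, 0, 0)   -- games[lo]; lo is in range on every call reached from foo_alt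
    if g.1 > g.2.2 then 3 else if g.1 = g.2.2 then 1 else 0
  else
    fooSolve games lo ((lo + hi) / 2) + fooSolve games ((lo + hi) / 2) hi
termination_by hi - lo
decreasing_by all_goals omega

def foo_alt (games : List (Int × Int × Int)) : Int :=
  fooSolve games 0 games.length

-- ===== PRECONDITION & SPEC =====
def Spec_foo (games : List (Int × Int × Int)) (out : Int) : Prop := out = foo_alt games
instance (games : List (Int × Int × Int)) (out : Int) : Decidable (Spec_foo games out) := by unfold Spec_foo; infer_instance

-- ===== CLAIM (what is proved, stated in full; the proofs are below) =====
def Claim_equal_foo : Prop := ∀ (games : List (Int × Int × Int)), Dom_foo games → Spec_foo games (foo games)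

-- ===== LEMMAS AND PROOFS =====

def pvPts (g : Int × Int × Int) : Int :=
  if g.1 > g.2.2 then 3 else if g.1 = g.2.2 then 1 else 0

def pvSumPts (l : List (Int × Int × Int)) : Int := (l.map pvPts).sum

theorem pvSumPts_append (l m : List (Int × Int × Int)) :
    pvSumPts (l ++ m) = pvSumPts l + pvSumPts m := by
  simp [pvSumPts]

theorem foo_eq_foldl (games : List (Int × Int × Int)) :
    foo games = games.foldl
      (fun rank g =>
        if g.1 > g.2.2 then rank + 3
        else if g.1 = g.2.2 then rank + 1
        else rank + 0) 0 := by
  unfold foo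
  exact PySem.List.foldl_pyRange_zero_pyGetD games (0,0,0)
    (fun rank g => if g.1 > g.2.2 then rank + 3 else if g.1 = g.2.2 then rank + 1 else rank + 0) 0

theorem foo_loop_shift (games : List (Int × Int × Int)) (a : Int) :
    games.foldl
      (fun rank g =>
        if g.1 > g.2.2 then rank + 3
        else if g.1 = g.2.2 then rank + 1
        else rank + 0) a = a + pvSumPts games := by
  induction games generalizing a with
  | nil => simp [pvSumPts]
  | cons g t ih =>
    simp only [List.foldl_cons, ih]
    simp only [pvSumPts, pvPts, List.map_cons, List.sum_cons]
    split_ifs <;> ring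

theorem fooSolve_eq (games : List (Int × Int × Int)) :
    ∀ n lo, lo + n ≤ games.length →
      fooSolve games lo (lo + n) = pvSumPts ((games.drop lo).take n) := by
  intro n
  induction n using Nat.strong_induction_on with
  | _ n ih =>
    intro lo hle
    match n, ih with
    | 0, _ =>
      rw [fooSolve]
      simp [pvSumPts]
    | 1, _ =>
      rw [fooSolve]
      have hlt : lo < games.length := by omega
      have hdrop : games.drop lo = games[lo] :: games.drop (lo + 1) :=
        List.drop_eq_getElem_cons hlt
      have h0 : ¬ (lo + 1 - lo = 0) := by omega
      have h1 : lo + 1 - lo = 1 := by omega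
      rw [if_neg h0, if_pos h1, hdrop]
      simp only [List.getD, List.getElem?_eq_getElem hlt, Option.getD_some,
        List.take_succ_cons, List.take_zero, pvSumPts, List.map_cons, List.map_nil,
        List.sum_cons, List.sum_nil, pvPts, add_zero]
    | (k + 2), ih =>
      rw [fooSolve]
      have h2 : ¬ (lo + (k + 2) - lo = 0) := by omega
      have h1 : ¬ (lo + (k + 2) - lo = 1) := by omega
      rw [if_neg h2, if_neg h1]
      set m : Nat := (k + 2) / 2 with hm
      have hmid : (lo + (lo + (k + 2))) / 2 = lo + m := by omega
      rw [hmid]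
      have hm1 : 1 ≤ m := by omega
      have hmlt : m < k + 2 := by omega
      have hrest : lo + (k + 2) = (lo + m) + ((k + 2) - m) := by omega
      rw [hrest]
      rw [ih m hmlt lo (by omega), ih ((k + 2) - m) (by omega) (lo + m) (by omega)]
      have hsplit : (games.drop lo).take (k + 2) =
          (games.drop lo).take m ++ ((games.drop lo).drop m).take ((k + 2) - m) := by
        rw [← List.take_add]
        congr 1
        omega
      rw [hsplit, pvSumPts_append, List.drop_drop]

-- ===== VERDICT (by name: the statement is the Claim_ definition above) =====
theorem foo_spec : Claim_equal_foo := by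
  intro games _
  unfold Spec_foo foo_alt
  have h := fooSolve_eq games games.length 0 (by omega)
  simp only [Nat.zero_add, List.drop_zero] at h
  rw [h, List.take_length, foo_eq_foldl, foo_loop_shift]
  simp
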